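-- pv_equiv track=rewrite | github.com/radzikowskikacper/shalegas | web/images/archiver.py | calculateHelpersNumber
-- ===== SOURCE A (Python) =====
-- def calculateHelpersNumber(depths_list):
--     count = 0
--     last = None
--     for depth in depths_list:
--         temp = depth
--         if last is not None:
--             for i in range(1, 4):
--                 if last // 10**i * 10**i < temp // 10**i * 10**i:
--                     count += 1
--                 else:
--                     break
--         else:
--             count += 3
--         last = temp
--     if count:
--         count += 1
--     return count
-- ===== SOURCE B (Python) =====
-- def calculateHelpersNumber(depths_list):
--     if not depths_list:
--         return 0
--     pairs = list(zip(depths_list, depths_list[1:]))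
--     total = 4
--     for i in (1, 2, 3):
--         total += sum(1 for a, b in pairs if a // 10**i < b // 10**i)
--     return total
-- ===== Notes on version B (the rewrite author's own statement) =====
-- stated objective: alternative
-- what changed: B eliminates A's inner break-loop entirely: it counts, level by level in three staged passes over the consecutive pairs, the pairs whose truncations differ at that level, exploiting that a change at level i forces a change at every lower level (so A's break never cuts a true comparison); the first element's +3 and the trailing +1 are folded into a constant 4 and the empty list short-circuits to 0.
import Mathlib
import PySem

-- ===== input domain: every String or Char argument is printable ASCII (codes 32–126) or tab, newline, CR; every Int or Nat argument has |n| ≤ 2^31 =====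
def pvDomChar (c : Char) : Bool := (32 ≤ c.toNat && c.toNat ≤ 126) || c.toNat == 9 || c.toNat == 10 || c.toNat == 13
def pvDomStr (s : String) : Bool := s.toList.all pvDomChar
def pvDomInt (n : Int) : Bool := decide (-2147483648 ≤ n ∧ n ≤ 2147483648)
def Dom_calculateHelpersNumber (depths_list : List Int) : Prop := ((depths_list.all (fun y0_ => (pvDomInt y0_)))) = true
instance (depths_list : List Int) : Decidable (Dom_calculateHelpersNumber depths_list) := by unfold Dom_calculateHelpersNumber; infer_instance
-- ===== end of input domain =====

-- B replaces A's per-pair break-loop by three staged per-level counting passes over the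
-- consecutive pairs (a change at level i forces one at every lower level, so the break is
-- redundant), with the first element's +3 and the trailing +1 folded into a constant 4
-- (objective: alternative).

-- ===== PORT A =====
-- inner `for i in range(1, 4)` loop with break: returns the count contributed
def pvInnerA : List Nat → Int → Int → Int
  | [], _, _ => 0
  | i :: rest, last, temp =>
      if PySem.Int.floordiv last (10 ^ i) * 10 ^ i < PySem.Int.floordiv temp (10 ^ i) * 10 ^ i then
        1 + pvInnerA rest last temp
      else 0

-- outer loop: state (count, last)
def pvLoopA : List Int → Int → Option Int → Int
  | [], count, _ => count
  | depth :: rest, count, last =>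
      match last with
      | some l => pvLoopA rest (count + pvInnerA [1, 2, 3] l depth) (some depth)
      | none => pvLoopA rest (count + 3) (some depth)

def calculateHelpersNumber (depths_list : List Int) : Int :=
  let count := pvLoopA depths_list 0 none
  if count ≠ 0 then count + 1 else count

-- ===== PORT B =====
-- `sum(1 for a, b in pairs if a // 10**i < b // 10**i)`: one counting pass at level i
def pvLevelCount (i : Nat) (pairs : List (Int × Int)) : Int :=
  pairs.foldl
    (fun s p => if PySem.Int.floordiv p.1 (10 ^ i) < PySem.Int.floordiv p.2 (10 ^ i) then s + 1 else s) 0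

def calculateHelpersNumber_alt (depths_list : List Int) : Int :=
  match depths_list with
  | [] => 0
  | _ :: _ =>
      let pairs := depths_list.zip depths_list.tail
      [1, 2, 3].foldl (fun total i => total + pvLevelCount i pairs) 4

-- ===== PRECONDITION & SPEC =====
def Spec_calculateHelpersNumber (depths_list : List Int) (out : Int) : Prop := out = calculateHelpersNumber_alt depths_list
instance (depths_list : List Int) (out : Int) : Decidable (Spec_calculateHelpersNumber depths_list out) := by unfold Spec_calculateHelpersNumber; infer_instance

-- ===== CLAIM (what is proved, stated in full; the proofs are below) =====
def Claim_equal_calculateHelpersNumber : Prop := ∀ (depths_list : List Int), Dom_calculateHelpersNumber depths_list → Spec_calculateHelpersNumber depths_list (calculateHelpersNumber depths_list)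

-- ===== LEMMAS AND PROOFS =====
-- indicator of the level-i comparison
def pvInd (i : Nat) (a b : Int) : Int :=
  if PySem.Int.floordiv a (10 ^ i) < PySem.Int.floordiv b (10 ^ i) then 1 else 0

-- a change at level i+1 forces a change at level i
theorem pvStep (a b : Int) (i : Nat)
    (h : PySem.Int.floordiv a (10 ^ (i + 1)) < PySem.Int.floordiv b (10 ^ (i + 1))) :
    PySem.Int.floordiv a (10 ^ i) < PySem.Int.floordiv b (10 ^ i) := by
  rw [PySem.Int.floordiv_eq_ediv_of_pos (by positivity),
      PySem.Int.floordiv_eq_ediv_of_pos (by positivity)] at h ⊢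
  by_contra hc
  rw [not_lt] at hc
  have hm : b / (10 : Int) ^ i / 10 ≤ a / (10 : Int) ^ i / 10 :=
    Int.ediv_le_ediv (by norm_num) hc
  rw [Int.ediv_ediv_of_nonneg (by positivity),
      Int.ediv_ediv_of_nonneg (by positivity), ← pow_succ] at hm
  exact absurd h (not_lt.2 hm)

theorem pvInnerA_eq_sum (a b : Int) :
    pvInnerA [1, 2, 3] a b = pvInd 1 a b + pvInd 2 a b + pvInd 3 a b := by
  have hcond : ∀ i : Nat,
      (PySem.Int.floordiv a (10 ^ i) * 10 ^ i < PySem.Int.floordiv b (10 ^ i) * 10 ^ i)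
        ↔ (PySem.Int.floordiv a (10 ^ i) < PySem.Int.floordiv b (10 ^ i)) := by
    intro i
    have hpos : (0 : Int) < 10 ^ i := by positivity
    constructor
    · intro h; exact lt_of_mul_lt_mul_right h (le_of_lt hpos)
    · intro h; exact mul_lt_mul_of_pos_right h hpos
  have s2 := fun h => pvStep a b 1 h
  have s3 := fun h => pvStep a b 2 h
  simp only [pvInnerA, pvInd, hcond]
  norm_num [PySem.Int.floordiv_eq_ediv_of_pos] at s2 s3 ⊢
  split_ifs <;> omega

-- sum of A's per-pair contributions along the list, starting from `l`
def pvPairSum : Int → List Int → Int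
  | _, [] => 0
  | l, d :: rest => pvInnerA [1, 2, 3] l d + pvPairSum d rest

theorem pvInnerA_nonneg (l : List Nat) (a b : Int) : 0 ≤ pvInnerA l a b := by
  induction l with
  | nil => simp [pvInnerA]
  | cons i rest ih => simp only [pvInnerA]; split <;> omega

theorem pvPairSum_nonneg (l : Int) (rest : List Int) : 0 ≤ pvPairSum l rest := by
  induction rest generalizing l with
  | nil => simp [pvPairSum]
  | cons d rs ih =>
      have := pvInnerA_nonneg [1, 2, 3] l d
      have := ih d
      simp only [pvPairSum]; omega

theorem pvLoopA_some (rest : List Int) : ∀ (c l : Int),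
    pvLoopA rest c (some l) = c + pvPairSum l rest := by
  induction rest with
  | nil => intro c l; simp [pvLoopA, pvPairSum]
  | cons d rs ih =>
      intro c l
      simp only [pvLoopA, pvPairSum, ih]
      ring

-- a level-count fold, with its init pulled out
theorem pvLevelCount_foldl (i : Nat) (pairs : List (Int × Int)) : ∀ t : Int,
    pairs.foldl
      (fun s p => if PySem.Int.floordiv p.1 (10 ^ i) < PySem.Int.floordiv p.2 (10 ^ i) then s + 1 else s) t
      = t + pvLevelCount i pairs := by
  induction pairs with
  | nil => intro t; simp [pvLevelCount]
  | cons p ps ih =>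
      intro t
      simp only [pvLevelCount, List.foldl_cons] at *
      split
      · rw [ih (t + 1), ih (0 + 1)]; omega
      · exact ih t

-- the three per-level counts over the zipped pairs sum to A's pair sum
theorem pvLevels_eq_pairSum (rest : List Int) : ∀ l : Int,
    pvLevelCount 1 ((l :: rest).zip rest) + pvLevelCount 2 ((l :: rest).zip rest)
      + pvLevelCount 3 ((l :: rest).zip rest) = pvPairSum l rest := by
  induction rest with
  | nil => intro l; simp [pvLevelCount, pvPairSum]
  | cons d rs ih =>
      intro l
      simp only [List.zip_cons_cons, pvLevelCount, List.foldl_cons, pvPairSum]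
      rw [pvLevelCount_foldl 1, pvLevelCount_foldl 2, pvLevelCount_foldl 3,
          pvInnerA_eq_sum, ← ih d]
      simp only [pvInd]
      norm_num [PySem.Int.floordiv_eq_ediv_of_pos]
      split_ifs <;> omega

-- ===== VERDICT (by name: the statement is the Claim_ definition above) =====
theorem calculateHelpersNumber_spec : Claim_equal_calculateHelpersNumber := by
  intro xs _
  unfold Spec_calculateHelpersNumber
  match xs with
  | [] => rfl
  | x :: rest =>
      have hA : pvLoopA (x :: rest) 0 none = 3 + pvPairSum x rest := by
        simp [pvLoopA, pvLoopA_some]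
      have hs := pvPairSum_nonneg x rest
      have hB : calculateHelpersNumber_alt (x :: rest) = 4 + pvPairSum x rest := by
        simp only [calculateHelpersNumber_alt, List.tail_cons, List.foldl_cons, List.foldl_nil,
          add_assoc]
        rw [← pvLevels_eq_pairSum rest x]
        ring
      simp only [calculateHelpersNumber, hA, hB]
      rw [if_pos (by omega)]
      ring
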